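-- pv_equiv track=rewrite | github.com/vim-scripts/ctags_cache | c_complete.py | typeref_to_struct_name
-- ===== SOURCE A (Python) =====
-- def typeref_to_struct_name(typeref):
--     """
--     the 'typeref' field is generated by ctags, it may contain many
--     middle struct name, we don't need them. but, the "__anon*" struct is
--     useful, should keep it.
--     """
--     kind, sep, name = typeref.partition(':')
--     name_parts = name.split('::')
--     name_parts.reverse()
--     name = []
--     for s in name_parts:
--         name.insert(0, s)
--         if not s.startswith('__anon'):
--             break
--
--     return kind + sep + "::".join(name)
-- ===== SOURCE B (Python) =====
-- def typeref_to_struct_name(typeref):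
--     """
--     the 'typeref' field is generated by ctags, it may contain many
--     middle struct name, we don't need them. but, the "__anon*" struct is
--     useful, should keep it.
--     """
--     kind, sep, name = typeref.partition(':')
--     parts = name.split('::')
--     idx = 0
--     for i, p in enumerate(parts):
--         if not p.startswith('__anon'):
--             idx = i
--     return kind + sep + '::'.join(parts[idx:])
-- ===== Notes on version B (the rewrite author's own statement) =====
-- stated objective: simpler
-- what changed: Replaces A's reverse + front-insertion loop with early break by a single forward scan recording the index of the last part not starting with '__anon' (default 0) and returning a slice join; no intermediate reversed list or incrementally built list.
import Mathlib
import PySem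

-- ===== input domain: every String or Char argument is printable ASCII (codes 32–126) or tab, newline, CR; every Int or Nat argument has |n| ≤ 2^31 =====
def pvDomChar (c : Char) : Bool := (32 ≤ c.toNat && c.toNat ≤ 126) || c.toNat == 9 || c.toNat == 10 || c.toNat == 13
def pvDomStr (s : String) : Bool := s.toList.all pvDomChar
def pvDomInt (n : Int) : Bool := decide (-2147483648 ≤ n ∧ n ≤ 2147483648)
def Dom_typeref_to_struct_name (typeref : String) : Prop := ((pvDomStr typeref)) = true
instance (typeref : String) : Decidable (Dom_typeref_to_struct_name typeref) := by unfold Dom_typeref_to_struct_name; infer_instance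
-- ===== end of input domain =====

-- B replaces A's reverse + front-insertion loop with a forward scan for the last non-'__anon' index and a slice join (simpler decomposition, same O(n) cost).

-- ===== PORT A =====
-- typeref.partition(':') — exact hand port: first ':' via find; no ':' gives (s, '', '')
def pvPartitionColon (s : List Char) : List Char × List Char × List Char :=
  let i := PySem.Chars.find s [':']
  if i = -1 then (s, [], [])
  else (s.take i.toNat, [':'], s.drop (i.toNat + 1))

-- the for-loop of A: name.insert(0, s) is cons; break on first non-'__anon'
def pvLoopA : List (List Char) → List (List Char) → List (List Char)
  | [], acc => acc
  | p :: rest, acc =>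
      let acc' := p :: acc
      if PySem.Chars.startswith p "__anon".toList then pvLoopA rest acc' else acc'

def typeref_to_struct_name (typeref : String) : String :=
  let (kind, sep, name) := pvPartitionColon typeref.toList
  let name_parts := PySem.Chars.splitOn name [':', ':']
  let rev := name_parts.reverse
  let kept := pvLoopA rev []
  String.ofList (kind ++ sep ++ PySem.Chars.join [':', ':'] kept)

-- ===== PORT B =====
def typeref_to_struct_name_alt (typeref : String) : String :=
  let (kind, sep, name) := pvPartitionColon typeref.toList
  let parts := PySem.Chars.splitOn name [':', ':']
  let idx := (PySem.List.enumerate parts 0).foldl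
    (fun idx ip => if PySem.Chars.startswith ip.2 "__anon".toList then idx else ip.1) (0 : Int)
  String.ofList (kind ++ sep ++ PySem.Chars.join [':', ':'] (PySem.List.slice parts (some idx) none))

-- ===== PRECONDITION & SPEC =====
def Spec_typeref_to_struct_name (typeref : String) (out : String) : Prop := out = typeref_to_struct_name_alt typeref
instance (typeref : String) (out : String) : Decidable (Spec_typeref_to_struct_name typeref out) := by unfold Spec_typeref_to_struct_name; infer_instance

-- ===== CLAIM (what is proved, stated in full; the proofs are below) =====
def Claim_equal_typeref_to_struct_name : Prop := ∀ (typeref : String), Dom_typeref_to_struct_name typeref → Spec_typeref_to_struct_name typeref (typeref_to_struct_name typeref)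

-- ===== LEMMAS AND PROOFS =====

-- the B-side index accumulator on an arbitrary start value
def pvIdx (parts : List (List Char)) (s : Int) (init : Int) : Int :=
  (PySem.List.enumerate parts s).foldl
    (fun idx ip => if PySem.Chars.startswith ip.2 "__anon".toList then idx else ip.1) init

theorem pvLoopA_acc (l : List (List Char)) (acc : List (List Char)) :
    pvLoopA l acc = pvLoopA l [] ++ acc := by
  induction l generalizing acc with
  | nil => simp [pvLoopA]
  | cons p rest ih =>
      simp only [pvLoopA]
      split_ifs with h
      · rw [ih (p :: acc), ih [p]]; simp
      · simp

theorem pvIdx_append (parts : List (List Char)) (p : List Char) (s init : Int) :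
    pvIdx (parts ++ [p]) s init =
      if PySem.Chars.startswith p "__anon".toList then pvIdx parts s init
      else s + parts.length := by
  simp [pvIdx, PySem.List.enumerate_append, List.foldl_append, PySem.List.enumerate]

theorem pvIdx_nonneg_le (parts : List (List Char)) :
    0 ≤ pvIdx parts 0 0 ∧ pvIdx parts 0 0 ≤ parts.length := by
  induction parts using List.reverseRecOn with
  | nil => simp [pvIdx, PySem.List.enumerate]
  | append_singleton xs p ih =>
      obtain ⟨h1, h2⟩ := ih
      rw [pvIdx_append]
      split_ifs with h <;> simp <;> omega

theorem pvLoop_eq_drop (parts : List (List Char)) :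
    pvLoopA parts.reverse [] = parts.drop (pvIdx parts 0 0).toNat := by
  induction parts using List.reverseRecOn with
  | nil => simp [pvLoopA, pvIdx, PySem.List.enumerate]
  | append_singleton xs p ih =>
      have hle := (pvIdx_nonneg_le xs).2
      rw [List.reverse_append, pvIdx_append]
      simp only [List.reverse_singleton, List.singleton_append, pvLoopA]
      split_ifs with h
      · rw [pvLoopA_acc, ih, List.drop_append_of_le_length]
        omega
      · have hn : ((0 : Int) + (xs.length : Int)).toNat = xs.length := by omega
        rw [hn, List.drop_append_of_le_length (le_refl _), List.drop_length,
            List.nil_append]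

-- ===== VERDICT (by name: the statement is the Claim_ definition above) =====
theorem typeref_to_struct_name_spec : Claim_equal_typeref_to_struct_name := by
  intro typeref _
  unfold Spec_typeref_to_struct_name typeref_to_struct_name typeref_to_struct_name_alt
  obtain ⟨kind, sep, name⟩ := pvPartitionColon typeref.toList
  simp only
  rw [show (PySem.List.enumerate (PySem.Chars.splitOn name [':', ':']) 0).foldl
      (fun idx ip => if PySem.Chars.startswith ip.2 "__anon".toList then idx else ip.1) (0 : Int)
      = pvIdx (PySem.Chars.splitOn name [':', ':']) 0 0 from rfl]
  rw [PySem.List.slice_from _ (pvIdx_nonneg_le _).1, pvLoop_eq_drop]
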